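-- pv_equiv track=rewrite | github.com/jonowo/hkowoibot | emojis.py | sep_emojis
-- ===== SOURCE A (Python) =====
-- from typing import Optional, List  # List instead of list for Python 3.8 compatibility
--
-- def sep_emojis(emoji: str, cnt: int) -> List[str]:
--     """Bypass Discord message limit by separating emoijs into muliple messges."""
--     emoji = str(emoji)
--     per_msg = 2000 // len(emoji)
--     sep_msgs = []
--     while True:
--         if cnt >= per_msg:
--             sep_msgs.append(emoji * per_msg)
--             cnt -= per_msg
--             if cnt == 0:
--                 break
--         else:
--             sep_msgs.append(emoji * cnt)
--             break
--     return sep_msgs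
-- ===== SOURCE B (Python) =====
-- def sep_emojis(emoji, cnt):
--     """Bypass Discord message limit by separating emojis into multiple messages."""
--     emoji = str(emoji)
--     per_msg = 2000 // len(emoji)
--     if per_msg == 0 or cnt < per_msg:
--         return [emoji * cnt]
--     text = emoji * cnt
--     step = per_msg * len(emoji)
--     return [text[i:i + step] for i in range(0, len(text), step)]
-- ===== Notes on version B (the rewrite author's own statement) =====
-- stated objective: idiomatic
-- what changed: Replaces A's count-down while/break loop that appends per_msg emoji copies per iteration by materialising the full string emoji*cnt once and slicing it into fixed character-index windows with a range comprehension; the small/non-positive case is a single guard.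
import Mathlib
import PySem

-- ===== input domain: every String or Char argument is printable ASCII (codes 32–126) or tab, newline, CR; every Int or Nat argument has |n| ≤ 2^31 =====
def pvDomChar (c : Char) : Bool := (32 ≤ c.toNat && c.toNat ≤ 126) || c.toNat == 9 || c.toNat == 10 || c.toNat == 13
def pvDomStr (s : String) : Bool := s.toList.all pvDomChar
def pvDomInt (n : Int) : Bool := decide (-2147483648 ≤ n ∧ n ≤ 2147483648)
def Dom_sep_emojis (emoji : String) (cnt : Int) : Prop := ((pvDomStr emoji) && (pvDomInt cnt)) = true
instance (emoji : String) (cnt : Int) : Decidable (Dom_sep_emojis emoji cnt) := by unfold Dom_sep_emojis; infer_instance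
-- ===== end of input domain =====

-- B replaces A's emoji-counting while/break loop by materialising the full string and
-- slicing it into fixed character-index windows (a comprehension over range); objective: idiomatic.

-- ===== PORT A =====
-- the 'while True' loop; fuel bounds the iterations (inside Pre_ the loop runs at most cnt times, so cnt.toNat + 1 fuel is never exhausted)
def sepLoopA (em : List Char) (perMsg : Int) : Nat → Int → List String → List String
  | 0, _, acc => acc.reverse
  | fuel+1, cnt, acc =>
    if perMsg ≤ cnt then
      if cnt - perMsg = 0 then (String.ofList (PySem.List.pyRepeat em perMsg) :: acc).reverse
      else sepLoopA em perMsg fuel (cnt - perMsg) (String.ofList (PySem.List.pyRepeat em perMsg) :: acc)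
    else (String.ofList (PySem.List.pyRepeat em cnt) :: acc).reverse

def sep_emojis (emoji : String) (cnt : Int) : List String :=
  let em := emoji.toList
  let perMsg := PySem.Int.floordiv 2000 (em.length : Int)
  sepLoopA em perMsg (cnt.toNat + 1) cnt []

-- ===== PORT B =====
def sep_emojis_alt (emoji : String) (cnt : Int) : List String :=
  let em := emoji.toList
  let L : Int := (em.length : Int)
  let perMsg := PySem.Int.floordiv 2000 L
  if perMsg = 0 ∨ cnt < perMsg then [String.ofList (PySem.List.pyRepeat em cnt)]
  else
    let text := PySem.List.pyRepeat em cnt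
    let step := perMsg * L
    (PySem.List.pyRange 0 (text.length : Int) step).map
      (fun i => String.ofList (PySem.List.slice text (some i) (some (i + step))))

-- ===== PRECONDITION & SPEC =====
-- Pre_ excludes emoji = "" (A raises ZeroDivisionError) and len(emoji) > 2000 with cnt > 0
-- (per_msg == 0 there, so A's while loop never terminates).
def Pre_sep_emojis (emoji : String) (cnt : Int) : Prop :=
  emoji.toList ≠ [] ∧ (emoji.toList.length ≤ 2000 ∨ cnt ≤ 0)
instance (emoji : String) (cnt : Int) : Decidable (Pre_sep_emojis emoji cnt) := by
  unfold Pre_sep_emojis; infer_instance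

def pvWitness_sep_emojis : String × Int := ("ab", 5)

def Spec_sep_emojis (emoji : String) (cnt : Int) (out : List String) : Prop := out = sep_emojis_alt emoji cnt
instance (emoji : String) (cnt : Int) (out : List String) : Decidable (Spec_sep_emojis emoji cnt out) := by unfold Spec_sep_emojis; infer_instance

-- ===== CLAIM (what is proved, stated in full; the proofs are below) =====
def Claim_equal_sep_emojis : Prop := ∀ (emoji : String) (cnt : Int), Dom_sep_emojis emoji cnt → Pre_sep_emojis emoji cnt → Spec_sep_emojis emoji cnt (sep_emojis emoji cnt)

-- ===== LEMMAS AND PROOFS =====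

-- B's else branch, as a function of cnt (definitionally the expression in sep_emojis_alt)
def bchunks (em : List Char) (p : Int) (cnt : Int) : List String :=
  (PySem.List.pyRange 0 (((PySem.List.pyRepeat em cnt).length : Nat) : Int) (p * (em.length : Int))).map
    (fun i => String.ofList (PySem.List.slice (PySem.List.pyRepeat em cnt) (some i)
      (some (i + p * (em.length : Int)))))

lemma rep_length (em : List Char) (n : Int) :
    (PySem.List.pyRepeat em n).length = n.toNat * em.length := by
  simp [PySem.List.pyRepeat, List.length_flatten, List.map_replicate, List.sum_replicate,
    smul_eq_mul]

lemma rep_append (em : List Char) {a b : Int} (ha : 0 ≤ a) (hb : 0 ≤ b) :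
    PySem.List.pyRepeat em (a + b) = PySem.List.pyRepeat em a ++ PySem.List.pyRepeat em b := by
  have h : (a + b).toNat = a.toNat + b.toNat := by omega
  simp only [PySem.List.pyRepeat, h, List.replicate_add, List.flatten_append]

lemma natCast_ediv_toNat (a b : ℕ) : (((a : Int)) / ((b : Int))).toNat = a / b := by
  rw [← Int.natCast_div]; exact Int.toNat_natCast _

lemma bchunks_eq_range (em : List Char) (p cnt : Int) (hL : 0 < em.length) (hp : 0 < p)
    (hc : 0 < cnt) :
    bchunks em p cnt =
      (List.range ((cnt.toNat * em.length + p.toNat * em.length - 1) / (p.toNat * em.length))).map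
        (fun k => String.ofList
          (((PySem.List.pyRepeat em cnt).drop (p.toNat * em.length * k)).take
            (p.toNat * em.length))) := by
  unfold bchunks
  have hq : ((p.toNat : Int)) = p := Int.toNat_of_nonneg hp.le
  have hstep : p * (em.length : Int) = ((p.toNat * em.length : Nat) : Int) := by
    push_cast [hq]; ring
  have hsN : 0 < p.toNat * em.length := by
    have : 0 < p.toNat := by omega
    positivity
  have hspos : (0:Int) < ((p.toNat * em.length : Nat) : Int) := by exact_mod_cast hsN
  rw [rep_length, hstep, PySem.List.pyRange_of_pos _ _ hspos]
  have hnn : 0 < cnt.toNat * em.length := by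
    have : 0 < cnt.toNat := by omega
    positivity
  rw [if_pos (by exact_mod_cast hnn)]
  have hm : ((((cnt.toNat * em.length : Nat) : Int) - 0 + ((p.toNat * em.length : Nat) : Int) - 1) /
      ((p.toNat * em.length : Nat) : Int)).toNat
      = (cnt.toNat * em.length + p.toNat * em.length - 1) / (p.toNat * em.length) := by
    have h1 : (((cnt.toNat * em.length : Nat) : Int) - 0 + ((p.toNat * em.length : Nat) : Int) - 1)
        = ((cnt.toNat * em.length + p.toNat * em.length - 1 : Nat) : Int) := by push_cast; omega
    rw [h1, natCast_ediv_toNat]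
  rw [hm, List.map_map]
  refine List.map_congr_left (fun k _ => ?_)
  have hidx : (0 : Int) + ((p.toNat * em.length : Nat) : Int) * (k : Int)
      = ((p.toNat * em.length * k : Nat) : Int) := by push_cast; ring
  simp only [Function.comp_apply, hidx]
  rw [PySem.List.slice_natCast_add]

lemma bchunks_zero (em : List Char) (p : Int) (hs : (0:Int) < p * (em.length : Int)) :
    bchunks em p 0 = [] := by
  unfold bchunks
  rw [show PySem.List.pyRepeat em 0 = [] from rfl]
  simp [PySem.List.pyRange_of_pos _ _ hs]

lemma bchunks_single (em : List Char) (p cnt : Int) (hL : 0 < em.length) (hp : 0 < p)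
    (h0 : 0 < cnt) (hc : cnt ≤ p) :
    bchunks em p cnt = [String.ofList (PySem.List.pyRepeat em cnt)] := by
  rw [bchunks_eq_range em p cnt hL hp h0]
  have hle : cnt.toNat * em.length ≤ p.toNat * em.length :=
    Nat.mul_le_mul_right _ (by omega)
  have h1 : 0 < cnt.toNat * em.length := by
    have : 0 < cnt.toNat := by omega
    positivity
  have hm : (cnt.toNat * em.length + p.toNat * em.length - 1) / (p.toNat * em.length) = 1 := by
    apply Nat.div_eq_of_lt_le <;> omega
  rw [hm, List.range_one, List.map_singleton, Nat.mul_zero, List.drop_zero,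
    List.take_of_length_le (by rw [rep_length]; exact hle)]

lemma bchunks_peel (em : List Char) (p cnt : Int) (hL : 0 < em.length) (hp : 0 < p)
    (hc : p ≤ cnt) :
    bchunks em p cnt = String.ofList (PySem.List.pyRepeat em p) :: bchunks em p (cnt - p) := by
  have hsN : 0 < p.toNat * em.length := by
    have : 0 < p.toNat := by omega
    positivity
  have hq : ((p.toNat : Int)) = p := Int.toNat_of_nonneg hp.le
  have hstep : p * (em.length : Int) = ((p.toNat * em.length : Nat) : Int) := by
    push_cast [hq]; ring
  have hs : (0:Int) < p * (em.length : Int) := by rw [hstep]; exact_mod_cast hsN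
  rcases eq_or_lt_of_le hc with heq | hlt
  · subst heq
    rw [bchunks_single em p p hL hp hp le_rfl, sub_self, bchunks_zero em p hs]
  · have hsplit : PySem.List.pyRepeat em cnt
        = PySem.List.pyRepeat em p ++ PySem.List.pyRepeat em (cnt - p) := by
      rw [← rep_append em hp.le (by omega)]; ring_nf
    have hlenp : (PySem.List.pyRepeat em p).length = p.toNat * em.length := rep_length em p
    rw [bchunks_eq_range em p cnt hL hp (by omega),
      bchunks_eq_range em p (cnt - p) hL hp (by omega)]
    have hn' : 0 < (cnt - p).toNat * em.length := by
      have : 0 < (cnt - p).toNat := by omega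
      positivity
    have hcnt : cnt.toNat * em.length = (cnt - p).toNat * em.length + p.toNat * em.length := by
      have h : cnt.toNat = (cnt - p).toNat + p.toNat := by omega
      rw [h, Nat.add_mul]
    have hm : (cnt.toNat * em.length + p.toNat * em.length - 1) / (p.toNat * em.length)
        = ((cnt - p).toNat * em.length + p.toNat * em.length - 1) / (p.toNat * em.length) + 1 := by
      rw [hcnt, show (cnt - p).toNat * em.length + p.toNat * em.length + p.toNat * em.length - 1
        = ((cnt - p).toNat * em.length + p.toNat * em.length - 1) + p.toNat * em.length by omega,
        Nat.add_div_right _ hsN]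
    rw [hm, List.range_succ_eq_map, List.map_cons, List.map_map]
    congr 1
    · rw [Nat.mul_zero, List.drop_zero, hsplit, ← hlenp, List.take_left]
    · refine List.map_congr_left (fun k _ => ?_)
      simp only [Function.comp_apply, Nat.succ_eq_add_one]
      rw [Nat.mul_add, Nat.mul_one, Nat.add_comm (p.toNat * em.length * k), ← List.drop_drop,
        hsplit, ← hlenp, List.drop_left]

lemma loopA_small (em : List Char) (p : Int) (fuel : Nat) (cnt : Int) (acc : List String)
    (h : cnt < p) :
    sepLoopA em p (fuel + 1) cnt acc
      = (String.ofList (PySem.List.pyRepeat em cnt) :: acc).reverse := by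
  simp [sepLoopA, not_le.mpr h]

lemma loopA_eq (em : List Char) (p : Int) (hL : 0 < em.length) (hp : 0 < p) :
    ∀ (fuel : Nat) (cnt : Int) (acc : List String), p ≤ cnt → cnt.toNat < fuel →
      sepLoopA em p fuel cnt acc = acc.reverse ++ bchunks em p cnt := by
  intro fuel
  induction fuel with
  | zero => intro cnt acc _ hf; omega
  | succ f ih =>
    intro cnt acc hc hf
    simp only [sepLoopA]
    rw [if_pos hc]
    by_cases h0 : cnt - p = 0
    · rw [if_pos h0]
      have hcp : cnt = p := by omega
      rw [hcp, bchunks_single em p p hL hp (by omega) le_rfl]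
      simp
    · rw [if_neg h0]
      by_cases h2 : p ≤ cnt - p
      · rw [ih (cnt - p) _ h2 (by omega), bchunks_peel em p cnt hL hp hc]
        simp
      · have hf' : f = (f - 1) + 1 := by omega
        rw [hf', loopA_small em p (f - 1) (cnt - p) _ (by omega),
          bchunks_peel em p cnt hL hp hc,
          bchunks_single em p (cnt - p) hL hp (by omega) (by omega)]
        simp

-- ===== VERDICT (by name: the statement is the Claim_ definition above) =====
theorem sep_emojis_spec : Claim_equal_sep_emojis := by
  intro emoji cnt _ hpre
  obtain ⟨hne, hsz⟩ := hpre
  have hL : 0 < emoji.toList.length := List.length_pos_of_ne_nil hne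
  have hLc : (0:Int) < (emoji.toList.length : Int) := by exact_mod_cast hL
  show sepLoopA emoji.toList (PySem.Int.floordiv 2000 (emoji.toList.length : Int))
      (cnt.toNat + 1) cnt []
    = if PySem.Int.floordiv 2000 (emoji.toList.length : Int) = 0
        ∨ cnt < PySem.Int.floordiv 2000 (emoji.toList.length : Int)
      then [String.ofList (PySem.List.pyRepeat emoji.toList cnt)]
      else bchunks emoji.toList (PySem.Int.floordiv 2000 (emoji.toList.length : Int)) cnt
  set em := emoji.toList with hem
  set p := PySem.Int.floordiv 2000 (em.length : Int) with hpdef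
  by_cases hbig : em.length ≤ 2000
  · -- per_msg ≥ 1
    have hp : 1 ≤ p := by
      rw [hpdef, PySem.Int.le_floordiv_iff_mul_le hLc, one_mul]
      exact_mod_cast hbig
    by_cases hlt : cnt < p
    · rw [if_pos (Or.inr hlt), loopA_small em p cnt.toNat cnt [] hlt]
      simp
    · rw [if_neg (by rintro (h | h) <;> omega)]
      have := loopA_eq em p hL (by omega) (cnt.toNat + 1) cnt [] (not_lt.mp hlt) (by omega)
      simpa using this
  · -- len(emoji) > 2000: per_msg = 0 and (Pre_) cnt ≤ 0
    have hcnt : cnt ≤ 0 := by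
      rcases hsz with h | h
      · exact absurd h hbig
      · exact h
    have hp0 : p = 0 := by
      rw [hpdef, PySem.Int.floordiv_eq_iff_of_pos hLc]
      refine ⟨by norm_num, ?_⟩
      rw [zero_add, one_mul]
      exact_mod_cast (by omega : 2000 < em.length)
    rw [hp0, if_pos (Or.inl rfl)]
    have hfuel : cnt.toNat + 1 = 0 + 1 := by omega
    rw [hfuel]
    by_cases hz : cnt = 0
    · subst hz
      simp only [sepLoopA]
      rw [if_pos le_rfl, if_pos (by norm_num)]
      simp
    · simp only [sepLoopA]
      rw [if_neg (by omega)]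
      simp
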